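-- pv_equiv track=rewrite | github.com/chakravarthiT/pdf-chapter-splitter | src/utils.py | suggest_equal_splits
-- ===== SOURCE A (Python) =====
-- def suggest_equal_splits(total_pages: int, num_parts: int) -> list[tuple[int, int, str]]:
--     """
--     Suggest equal splits for a document.
--
--     Args:
--         total_pages: Total number of pages
--         num_parts: Number of parts to split into
--
--     Returns:
--         List of (start, end, name) tuples
--     """
--     if num_parts <= 0:
--         num_parts = 1
--     if num_parts > total_pages:
--         num_parts = total_pages
--
--     pages_per_part = total_pages // num_parts
--     remainder = total_pages % num_parts
--
--     ranges = []
--     current_page = 1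
--
--     for i in range(num_parts):
--         # Distribute remainder across first few parts
--         extra = 1 if i < remainder else 0
--         part_pages = pages_per_part + extra
--
--         end_page = current_page + part_pages - 1
--         ranges.append((current_page, end_page, f"Part {i + 1}"))
--
--         current_page = end_page + 1
--
--     return ranges
-- ===== SOURCE B (Python) =====
-- def suggest_equal_splits(total_pages: int, num_parts: int) -> list[tuple[int, int, str]]:
--     n = min(max(num_parts, 1), total_pages)
--     if n <= 0:
--         return []
--     q, r = divmod(total_pages, n)
--     return [(i * q + min(i, r) + 1,
--              (i + 1) * q + min(i + 1, r),
--              f"Part {i + 1}")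
--             for i in range(n)]
-- ===== Notes on version B (the rewrite author's own statement) =====
-- stated objective: alternative
-- what changed: Each part's (start, end) is computed as a closed-form function of its index (i*q + min(i, r) offsets) in a single comprehension, replacing A's loop that accumulates a running current_page; on total_pages == 0, where A raises ZeroDivisionError, B returns [].
import Mathlib
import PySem

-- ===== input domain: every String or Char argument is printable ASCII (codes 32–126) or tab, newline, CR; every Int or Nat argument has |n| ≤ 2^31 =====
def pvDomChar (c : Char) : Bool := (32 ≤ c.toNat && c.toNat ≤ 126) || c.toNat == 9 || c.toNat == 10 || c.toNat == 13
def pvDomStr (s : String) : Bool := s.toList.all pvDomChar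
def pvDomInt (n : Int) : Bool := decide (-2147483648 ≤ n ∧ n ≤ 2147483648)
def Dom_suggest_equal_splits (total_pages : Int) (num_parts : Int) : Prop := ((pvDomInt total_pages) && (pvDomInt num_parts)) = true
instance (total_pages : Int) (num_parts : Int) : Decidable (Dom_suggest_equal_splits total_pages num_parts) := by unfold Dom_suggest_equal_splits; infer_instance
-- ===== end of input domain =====

-- B computes each part's range as a closed form of its index instead of A's running current_page accumulator; where A raises (total_pages = 0) B returns [].

-- ===== PORT A =====
def suggest_equal_splits (total_pages : Int) (num_parts : Int) : List (Int × Int × String) :=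
  let np0 : Int := if num_parts ≤ 0 then 1 else num_parts
  let np : Int := if np0 > total_pages then total_pages else np0
  let q : Int := PySem.Int.floordiv total_pages np
  let r : Int := PySem.Int.mod total_pages np
  ((PySem.List.pyRange 0 np 1).foldl
    (fun (st : List (Int × Int × String) × Int) i =>
      let extra : Int := if i < r then 1 else 0
      let part_pages := q + extra
      let end_page := st.2 + part_pages - 1
      (st.1 ++ [(st.2, end_page, "Part " ++ PySem.Int.toStr (i + 1))], end_page + 1))
    ([], 1)).1

-- ===== PORT B =====
def suggest_equal_splits_alt (total_pages : Int) (num_parts : Int) : List (Int × Int × String) :=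
  let n : Int := min (max num_parts 1) total_pages
  if n ≤ 0 then []
  else
    let q : Int := PySem.Int.floordiv total_pages n
    let r : Int := PySem.Int.mod total_pages n
    (PySem.List.pyRange 0 n 1).map (fun i =>
      (i * q + min i r + 1, (i + 1) * q + min (i + 1) r, "Part " ++ PySem.Int.toStr (i + 1)))

-- ===== PRECONDITION & SPEC =====
-- Pre_ excludes exactly total_pages = 0, where the clamped num_parts becomes 0 and A raises ZeroDivisionError.
def Pre_suggest_equal_splits (total_pages : Int) (num_parts : Int) : Prop := total_pages ≠ 0
instance (total_pages : Int) (num_parts : Int) : Decidable (Pre_suggest_equal_splits total_pages num_parts) := by unfold Pre_suggest_equal_splits; infer_instance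
def pvWitness_suggest_equal_splits : Int × Int := (10, 3)

def Spec_suggest_equal_splits (total_pages : Int) (num_parts : Int) (out : List (Int × Int × String)) : Prop := out = suggest_equal_splits_alt total_pages num_parts
instance (total_pages : Int) (num_parts : Int) (out : List (Int × Int × String)) : Decidable (Spec_suggest_equal_splits total_pages num_parts out) := by unfold Spec_suggest_equal_splits; infer_instance

-- ===== CLAIM (what is proved, stated in full; the proofs are below) =====
def Claim_equal_suggest_equal_splits : Prop := ∀ (total_pages : Int) (num_parts : Int), Dom_suggest_equal_splits total_pages num_parts → Pre_suggest_equal_splits total_pages num_parts → Spec_suggest_equal_splits total_pages num_parts (suggest_equal_splits total_pages num_parts)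

-- ===== LEMMAS AND PROOFS =====

-- A's loop body and B's closed-form tuple, abstracted over q, r.
def pvBodyA (q r : Int) (st : List (Int × Int × String) × Int) (i : Int) : List (Int × Int × String) × Int :=
  let extra : Int := if i < r then 1 else 0
  let part_pages := q + extra
  let end_page := st.2 + part_pages - 1
  (st.1 ++ [(st.2, end_page, "Part " ++ PySem.Int.toStr (i + 1))], end_page + 1)

def pvTupB (q r i : Int) : Int × Int × String :=
  (i * q + min i r + 1, (i + 1) * q + min (i + 1) r, "Part " ++ PySem.Int.toStr (i + 1))

lemma pv_loop (q r : Int) :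
    ∀ (m j : Nat) (acc : List (Int × Int × String)),
      (List.range' j m).foldl (fun st (k : Nat) => pvBodyA q r st (k : Int))
        (acc, (j : Int) * q + min (j : Int) r + 1)
      = (acc ++ (List.range' j m).map (fun (k : Nat) => pvTupB q r (k : Int)),
         ((j + m : Nat) : Int) * q + min ((j + m : Nat) : Int) r + 1) := by
  intro m
  induction m with
  | zero => intro j acc; simp
  | succ m ih =>
    intro j acc
    rw [List.range'_succ]
    simp only [List.map_cons, List.foldl_cons]
    have hm : min (j : Int) r + (if (j : Int) < r then (1 : Int) else 0) = min ((j : Int) + 1) r := by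
      split_ifs with h <;> omega
    have e1 : (j : Int) * q + min (j : Int) r + 1 + (q + if (j : Int) < r then (1 : Int) else 0) - 1
        = ((j : Int) + 1) * q + min ((j : Int) + 1) r := by
      rw [← hm]; ring
    have hstep : pvBodyA q r (acc, (j : Int) * q + min (j : Int) r + 1) (j : Int)
        = (acc ++ [pvTupB q r (j : Int)], ((j + 1 : Nat) : Int) * q + min ((j + 1 : Nat) : Int) r + 1) := by
      simp only [pvBodyA, pvTupB]
      rw [e1]
      push_cast
      rfl
    rw [hstep, ih (j + 1) (acc ++ [pvTupB q r (j : Int)])]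
    simp only [Prod.mk.injEq]
    refine ⟨by simp, ?_⟩
    have hjm : j + 1 + m = j + (m + 1) := by omega
    rw [hjm]

theorem suggest_equal_splits_spec : Claim_equal_suggest_equal_splits := by
  intro tp np _ hpre
  unfold Spec_suggest_equal_splits suggest_equal_splits suggest_equal_splits_alt
  dsimp only
  set np0 : Int := if np ≤ 0 then 1 else np with hnp0
  set n : Int := if np0 > tp then tp else np0 with hn
  have hnn : n = min (max np 1) tp := by
    rw [hn, hnp0]; simp only [max_def, min_def]; split_ifs <;> omega
  rcases le_or_gt tp 0 with htp | htp
  · -- tp < 0 (tp ≠ 0 by Pre_): n = tp ≤ 0, both sides empty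
    have hneg : n ≤ 0 := by rw [hnn]; omega
    rw [PySem.List.pyRange_one_eq_nil hneg]
    simp [← hnn, hneg]
  · -- tp > 0: 1 ≤ n ≤ tp
    have hn1 : 1 ≤ n := by rw [hnn]; omega
    have hnle : ¬ n ≤ 0 := by omega
    rw [← hnn]
    simp only [hnle, if_false]
    have hr : 0 ≤ PySem.Int.mod tp n := PySem.Int.mod_nonneg tp (by omega)
    set q := PySem.Int.floordiv tp n
    set r := PySem.Int.mod tp n
    rw [PySem.List.pyRange_one 0 n]
    simp only [sub_zero, zero_add, List.range_eq_range']
    rw [show ((fun (st : List (Int × Int × String) × Int) i =>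
        ((st.1 ++ [(st.2, st.2 + (q + if i < r then 1 else 0) - 1, "Part " ++ PySem.Int.toStr (i + 1))]),
          st.2 + (q + if i < r then 1 else 0) - 1 + 1)) = pvBodyA q r) from rfl]
    rw [List.foldl_map]
    have hA := pv_loop q r n.toNat 0 []
    simp only [Nat.cast_zero, zero_mul, zero_add] at hA
    rw [show min (0 : Int) r = 0 from by omega] at hA
    simp only [zero_add] at hA
    rw [hA]
    simp [pvTupB]
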